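-- pv_equiv track=rewrite | github.com/ABHINAV112/Python-Projects | Sentence Former/Fancy_Sentence.py | F
-- ===== SOURCE A (Python) =====
-- def empty_matrix(n):
--     return [[' ' for i in range(n)] for i in range(n)]
--
-- def F(n):
--     F_matrix=empty_matrix(n)
--     mid=(n-1)//2
--     for i in range(n):
--         for j in range(n):
--             if i==0 or i==mid:
--                 F_matrix[i][j]='F'
--
--             elif j==0:
--                 F_matrix[i][j]='F'
--
--     return F_matrix
-- ===== SOURCE B (Python) =====
-- def F(n):
--     mid = (n - 1) // 2
--     rows = []
--     for i in range(n):
--         if i == 0 or i == mid: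
--             rows.append(['F'] * n)
--         else:
--             row = [' '] * n
--             row[0] = 'F'
--             rows.append(row)
--     return rows
-- ===== Notes on version B (the rewrite author's own statement) =====
-- stated objective: simpler
-- what changed: Builds each row as a whole unit with list multiplication (['F']*n, or [' ']*n with cell 0 overwritten) in a single pass over rows, instead of allocating a blank n*n matrix and then re-scanning every cell with a nested j-loop and per-cell branch.
import Mathlib
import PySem

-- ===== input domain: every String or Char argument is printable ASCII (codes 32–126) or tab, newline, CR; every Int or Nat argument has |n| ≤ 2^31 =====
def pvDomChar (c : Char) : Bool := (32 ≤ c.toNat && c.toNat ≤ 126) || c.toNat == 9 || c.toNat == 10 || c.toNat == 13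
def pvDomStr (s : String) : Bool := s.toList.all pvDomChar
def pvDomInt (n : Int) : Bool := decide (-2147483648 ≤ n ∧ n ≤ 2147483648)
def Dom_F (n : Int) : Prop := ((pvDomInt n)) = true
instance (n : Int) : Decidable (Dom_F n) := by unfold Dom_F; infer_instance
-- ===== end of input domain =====

-- B builds each row as a whole unit (['F']*n, or [' ']*n with cell 0 overwritten) in a single
-- pass over rows, instead of A's blank n×n matrix re-scanned by a nested per-cell loop (objective: simpler).

-- ===== PORT A =====
def emptyMatrix (n : Int) : List (List String) :=
  (PySem.List.pyRange 0 n 1).map (fun _ => (PySem.List.pyRange 0 n 1).map (fun _ => " "))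

def F (n : Int) : List (List String) :=
  let mid := PySem.Int.floordiv (n - 1) 2
  (PySem.List.pyRange 0 n 1).foldl (fun M i =>
    (PySem.List.pyRange 0 n 1).foldl (fun M j =>
      if i == 0 || i == mid then
        PySem.List.pySetD M i (PySem.List.pySetD (PySem.List.pyGetD M i []) j "F")
      else if j == 0 then
        PySem.List.pySetD M i (PySem.List.pySetD (PySem.List.pyGetD M i []) j "F")
      else M) M) (emptyMatrix n)

-- ===== PORT B =====
def F_alt (n : Int) : List (List String) :=
  let mid := PySem.Int.floordiv (n - 1) 2
  (PySem.List.pyRange 0 n 1).foldl (fun rows i =>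
    if i == 0 || i == mid then rows ++ [List.replicate n.toNat "F"]
    else rows ++ [PySem.List.pySetD (List.replicate n.toNat " ") 0 "F"]) []

-- ===== PRECONDITION & SPEC =====
def Spec_F (n : Int) (out : List (List String)) : Prop := out = F_alt n
instance (n : Int) (out : List (List String)) : Decidable (Spec_F n out) := by unfold Spec_F; infer_instance

-- ===== CLAIM (what is proved, stated in full; the proofs are below) =====
def Claim_equal_F : Prop := ∀ (n : Int), Dom_F n → Spec_F n (F n)

-- ===== LEMMAS AND PROOFS =====

-- the per-row effect of A's inner j-loop on row i (full 'F' row, or first cell set)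
def rowFun (n mid : Int) (i : Int) (row : List String) : List String :=
  if i == 0 || i == mid then List.replicate n.toNat "F" else PySem.List.pySetD row 0 "F"

-- a fold that only reads and writes row i equals a single write of the folded row
theorem localize {T : Type} (d : T) (h : Int → T → T) (i : Int) (h0 : 0 ≤ i) :
    ∀ (L : List Int) (M : List T), i < (M.length : Int) →
      L.foldl (fun M j => PySem.List.pySetD M i (h j (PySem.List.pyGetD M i d))) M
        = PySem.List.pySetD M i (L.foldl (fun r j => h j r) (PySem.List.pyGetD M i d)) := by
  intro L
  induction L with
  | nil =>
    intro M hM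
    simp only [List.foldl_nil]
    rw [PySem.List.pyGetD_eq_getElem M d h0 hM, PySem.List.pySetD_of_nonneg M _ h0]
    exact (List.set_getElem_self (by omega)).symm
  | cons j L ih =>
    intro M hM
    have e1 : PySem.List.pyGetD (PySem.List.pySetD M i (h j (PySem.List.pyGetD M i d))) i d
        = h j (PySem.List.pyGetD M i d) := by
      rw [PySem.List.pySetD_of_nonneg M _ h0]
      rw [PySem.List.pyGetD_eq_getElem _ d h0 (by simp only [List.length_set]; exact hM)]
      exact List.getElem_set_self (by simp only [List.length_set]; omega)
    have e2 : ∀ r, PySem.List.pySetD (PySem.List.pySetD M i (h j (PySem.List.pyGetD M i d))) i r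
        = PySem.List.pySetD M i r := by
      intro r
      rw [PySem.List.pySetD_of_nonneg M (h j (PySem.List.pyGetD M i d)) h0,
        PySem.List.pySetD_of_nonneg _ r h0, PySem.List.pySetD_of_nonneg M r h0]
      exact List.set_set _
    simp only [List.foldl_cons]
    rw [ih (PySem.List.pySetD M i (h j (PySem.List.pyGetD M i d)))
        (by rw [PySem.List.length_pySetD]; exact hM)]
    rw [e1, e2]

-- a fold of row-local writes over indices |P|, |P|+1, … rewrites each row of M once
theorem fold_set_rows {T : Type} (d : T) (Q : T → Prop) (step : List T → Int → List T)
    (g : Int → T → T)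
    (hg : ∀ i x, Q x → Q (g i x))
    (hstep : ∀ (A : List T) (i : Int), 0 ≤ i → i < (A.length : Int) → (∀ x ∈ A, Q x) →
        step A i = PySem.List.pySetD A i (g i (PySem.List.pyGetD A i d))) :
    ∀ (M P : List T), (∀ x ∈ P, Q x) → (∀ x ∈ M, Q x) →
      (PySem.List.pyRange (P.length) ((P.length : Int) + M.length) 1).foldl step (P ++ M)
        = P ++ (List.range M.length).map (fun k => g ((P.length + k : Nat) : Int) (M.getD k d)) := by
  intro M
  induction M with
  | nil =>
    intro P _ _
    rw [PySem.List.pyRange_one_eq_nil (by simp)]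
    simp
  | cons x M ih =>
    intro P hP hM
    rw [PySem.List.pyRange_one_cons (by simp only [List.length_cons]; push_cast; omega),
      List.foldl_cons,
      hstep (P ++ x :: M) (P.length : Int) (by positivity)
        (by simp only [List.length_append, List.length_cons]; push_cast; omega)
        (by intro z hz
            rcases List.mem_append.mp hz with h | h
            · exact hP z h
            · exact hM z h)]
    have hget : PySem.List.pyGetD (P ++ x :: M) ((P.length : Nat) : Int) d = x := by
      rw [PySem.List.pyGetD_natCast, List.getD_eq_getElem?_getD,
        List.getElem?_append_right (le_refl _)]
      simp
    have hset : PySem.List.pySetD (P ++ x :: M) ((P.length : Nat) : Int)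
        (g ((P.length : Nat) : Int) x) = (P ++ [g ((P.length : Nat) : Int) x]) ++ M := by
      rw [PySem.List.pySetD_natCast, List.set_append]
      simp
    rw [hget, hset]
    have hstart : ((P.length : Int) + 1)
        = (((P ++ [g ((P.length : Nat) : Int) x]).length : Nat) : Int) := by
      simp
    have hend : ((P.length : Int) + ((x :: M).length : Int))
        = (((P ++ [g ((P.length : Nat) : Int) x]).length : Int) + (M.length : Int)) := by
      simp only [List.length_append, List.length_cons, List.length_nil]
      push_cast
      ring
    rw [hstart, hend,
      ih (P ++ [g ((P.length : Nat) : Int) x])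
        (by intro z hz
            rcases List.mem_append.mp hz with h | h
            · exact hP z h
            · simp only [List.mem_singleton] at h
              subst h
              exact hg _ _ (hM x (by simp)))
        (fun z hz => hM z (by simp [hz]))]
    rw [List.append_assoc, List.singleton_append]
    congr 1
    rw [List.length_cons, List.range_succ_eq_map, List.map_cons, List.map_map]
    congr 1
    all_goals first
      | (simp; done)
      | (apply List.map_congr_left
         intro a ha
         simp only [Function.comp_apply, Nat.succ_eq_add_one, List.getD_cons_succ,
           List.length_append, List.length_cons, List.length_nil]
         congr 2
         omega)

-- steps guarded by 'j == 0' do nothing on a list without zeros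
theorem foldl_if_zero_id {α : Type} (f : α → Int → α) :
    ∀ (L : List Int) (a : α), (∀ j ∈ L, j ≠ 0) →
      L.foldl (fun a j => if j == 0 then f a j else a) a = a := by
  intro L
  induction L with
  | nil => intro a _; rfl
  | cons j L ih =>
    intro a hL
    have hj : (j == 0) = false := beq_eq_false_iff_ne.mpr (hL j (by simp))
    simp only [List.foldl_cons, hj, Bool.false_eq_true, if_false]
    exact ih a (fun z hz => hL z (by simp [hz]))

-- filling every cell of a row with 'F'
theorem row_fill (r : List String) :
    (PySem.List.pyRange 0 (r.length : Int) 1).foldl (fun s j => PySem.List.pySetD s j "F") r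
      = List.replicate r.length "F" := by
  have h := fold_set_rows " " (fun _ => True) (fun s j => PySem.List.pySetD s j "F")
    (fun _ _ => "F") (by simp) (fun A i _ _ _ => rfl) r [] (by simp) (by simp)
  simpa [List.map_const'] using h

theorem F_eq_F_alt (n : Int) : F n = F_alt n := by
  by_cases hn : 1 ≤ n
  case neg =>
    have h0 : PySem.List.pyRange 0 n 1 = [] := PySem.List.pyRange_one_eq_nil (by omega)
    simp [F, F_alt, emptyMatrix, h0]
  case pos =>
    set mid := PySem.Int.floordiv (n - 1) 2 with hmid
    have hcast : ((n.toNat : Nat) : Int) = n := Int.toNat_of_nonneg (by omega)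
    -- A's inner loop on a valid matrix rewrites exactly row i
    have hstep : ∀ (A : List (List String)) (i : Int), 0 ≤ i → i < (A.length : Int) →
        (∀ row ∈ A, row.length = n.toNat) →
        (PySem.List.pyRange 0 n 1).foldl (fun M j =>
            if i == 0 || i == mid then
              PySem.List.pySetD M i (PySem.List.pySetD (PySem.List.pyGetD M i []) j "F")
            else if j == 0 then
              PySem.List.pySetD M i (PySem.List.pySetD (PySem.List.pyGetD M i []) j "F")
            else M) A
          = PySem.List.pySetD A i (rowFun n mid i (PySem.List.pyGetD A i [])) := by
      intro A i h0 hlt hQ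
      have hrowmem : PySem.List.pyGetD A i [] ∈ A := by
        rw [PySem.List.pyGetD_eq_getElem A [] h0 hlt]
        exact List.getElem_mem _
      have hrowlen : (PySem.List.pyGetD A i []).length = n.toNat := hQ _ hrowmem
      cases hB : (i == 0 || i == mid) with
      | true =>
        simp only [if_true]
        have hloc : (PySem.List.pyRange 0 n 1).foldl (fun M j =>
              PySem.List.pySetD M i (PySem.List.pySetD (PySem.List.pyGetD M i []) j "F")) A
            = PySem.List.pySetD A i ((PySem.List.pyRange 0 n 1).foldl
                (fun r j => PySem.List.pySetD r j "F") (PySem.List.pyGetD A i [])) :=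
          localize [] (fun j r => PySem.List.pySetD r j "F") i h0 (PySem.List.pyRange 0 n 1) A hlt
        rw [hloc]
        have hrw : PySem.List.pyRange 0 n 1
            = PySem.List.pyRange 0 ((PySem.List.pyGetD A i []).length : Int) 1 := by
          rw [hrowlen, hcast]
        rw [hrw, row_fill]
        simp [rowFun, hB, hrowlen]
      | false =>
        simp only [Bool.false_eq_true, if_false]
        rw [PySem.List.pyRange_one_cons (show (0:Int) < n by omega)]
        simp only [List.foldl_cons, beq_self_eq_true, if_true]
        rw [foldl_if_zero_id
            (fun M j => PySem.List.pySetD M i (PySem.List.pySetD (PySem.List.pyGetD M i []) j "F"))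
            (PySem.List.pyRange (0+1) n 1) _
            (by intro j hj
                have := PySem.List.mem_pyRange_one.mp hj
                omega)]
        simp only [rowFun, hB, Bool.false_eq_true, if_false]
    have hM0 : emptyMatrix n = List.replicate n.toNat (List.replicate n.toNat " ") := by
      unfold emptyMatrix
      rw [List.map_const', List.map_const', PySem.List.length_pyRange_one]
      norm_num
    have hA := fold_set_rows ([] : List String) (fun row => row.length = n.toNat)
      (fun M i => (PySem.List.pyRange 0 n 1).foldl (fun M j =>
          if i == 0 || i == mid then
            PySem.List.pySetD M i (PySem.List.pySetD (PySem.List.pyGetD M i []) j "F")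
          else if j == 0 then
            PySem.List.pySetD M i (PySem.List.pySetD (PySem.List.pyGetD M i []) j "F")
          else M) M)
      (rowFun n mid)
      (by intro i x hx
          unfold rowFun
          split
          · simp
          · rw [PySem.List.length_pySetD]
            exact hx)
      hstep
      (List.replicate n.toNat (List.replicate n.toNat " ")) []
      (by simp)
      (by intro x hx
          rw [List.eq_of_mem_replicate hx]
          simp)
    simp only [List.nil_append, List.length_nil, Nat.cast_zero, zero_add,
      List.length_replicate] at hA
    rw [hcast] at hA
    have hFa : F n = (List.range n.toNat).map
        (fun k => rowFun n mid ((k : Nat) : Int)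
          ((List.replicate n.toNat (List.replicate n.toNat " ")).getD k [])) := by
      simp only [F]
      rw [← hmid, hM0]
      exact hA
    have hBfun : (fun (rows : List (List String)) (i : Int) =>
          if i == 0 || i == mid then rows ++ [List.replicate n.toNat "F"]
          else rows ++ [PySem.List.pySetD (List.replicate n.toNat " ") 0 "F"])
        = (fun rows i => rows ++ [if i == 0 || i == mid then List.replicate n.toNat "F"
            else PySem.List.pySetD (List.replicate n.toNat " ") 0 "F"]) := by
      funext rows i
      cases hB : (i == 0 || i == mid) <;> simp
    have hFb : F_alt n = (PySem.List.pyRange 0 n 1).map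
        (fun i => if i == 0 || i == mid then List.replicate n.toNat "F"
          else PySem.List.pySetD (List.replicate n.toNat " ") 0 "F") := by
      simp only [F_alt]
      rw [← hmid, hBfun,
        PySem.List.foldl_append_singleton_eq_map
          (fun i => if i == 0 || i == mid then List.replicate n.toNat "F"
            else PySem.List.pySetD (List.replicate n.toNat " ") 0 "F")
          (PySem.List.pyRange 0 n 1) [],
        List.nil_append]
    rw [hFa, hFb, PySem.List.pyRange_one, List.map_map]
    rw [show n - 0 = n from by ring]
    apply List.map_congr_left
    intro k hk
    have hk' : k < n.toNat := List.mem_range.mp hk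
    have hgetD : (List.replicate n.toNat (List.replicate n.toNat " ")).getD k []
        = List.replicate n.toNat " " := by
      rw [List.getD_eq_getElem?_getD]
      simp [hk']
    simp only [Function.comp_apply, zero_add, rowFun, hgetD]

-- ===== VERDICT (by name: the statement is the Claim_ definition above) =====
theorem F_spec : Claim_equal_F := by
  intro n _
  unfold Spec_F
  exact F_eq_F_alt n
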